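-- pv_equiv track=rewrite | github.com/bssrdf/pyleet | ChooseEdgestoMaximizeScoreinaTree.py | maximumScore3
-- ===== SOURCE A (Python) =====
-- from typing import List
-- from collections import defaultdict
-- from functools import lru_cache
--
-- def maximumScore3(edges: List[List[int]]) -> int:
--     n = len(edges)
--     tree = defaultdict(lambda : defaultdict(int))
--     for i,(u, w) in enumerate(edges):
--         if u != -1:
--             tree[u][i] = w
--     @lru_cache(None)
--     def dfs(u):
--         # return (s1, s2)
--         # s1: max sum if we can use u->v edge
--         # s2: max sum if we do not use any u->v edge
--         if not tree[u]: return [0, 0]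
--         s1, s2 = 0, 0
--         nbs = tree[u]
--         for v in nbs:
--             s2 += max(dfs(v))
--         for v in nbs:
--             tmp = s2 - max(dfs(v)) + max(nbs[v], 0) + dfs(v)[1]
--             s1 = max(s1, tmp)
--         return (s1, s2)
--     return max(dfs(0))
-- ===== SOURCE B (Python) =====
-- from typing import List
-- from collections import defaultdict
--
-- def maximumScore3(edges: List[List[int]]) -> int:
--     n = len(edges)
--     children = defaultdict(list)
--     for i, (u, w) in enumerate(edges):
--         if u != -1:
--             children[u].append((i, w))
--
--     def relax(u, dp):
--         # one pass over u's children: accumulate the sum of bests and the best delta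
--         s2 = 0
--         best = None
--         for v, w in children[u]:
--             c1, c2 = dp.get(v, (0, 0))
--             m = c1 if c1 > c2 else c2
--             s2 += m
--             d = (w if w > 0 else 0) + c2 - m
--             if best is None or d > best:
--                 best = d
--         if best is None:
--             return (0, 0)
--         s1 = s2 + best
--         return (0 if s1 < 0 else s1, s2)
--
--     # bottom-up value iteration: no recursion; after k rounds every node of
--     # height <= k holds its final value, and a tree rooted at 0 has height <= n
--     dp = {}
--     for _ in range(n + 1):
--         dp = {u: relax(u, dp) for u in range(n)}
--     c1, c2 = dp.get(0, (0, 0))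
--     return c1 if c1 > c2 else c2
-- ===== Notes on version B (the rewrite author's own statement) =====
-- stated objective: alternative
-- what changed: B replaces A's memoized top-down recursive DFS over a nested dict-of-dicts by recursion-free bottom-up value iteration: n+1 Jacobi rounds each rebuild a flat dp table over all nodes from the previous table, with a single-pass delta accumulation per node; the fixpoint at node 0 equals A's dfs(0).
import Mathlib
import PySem

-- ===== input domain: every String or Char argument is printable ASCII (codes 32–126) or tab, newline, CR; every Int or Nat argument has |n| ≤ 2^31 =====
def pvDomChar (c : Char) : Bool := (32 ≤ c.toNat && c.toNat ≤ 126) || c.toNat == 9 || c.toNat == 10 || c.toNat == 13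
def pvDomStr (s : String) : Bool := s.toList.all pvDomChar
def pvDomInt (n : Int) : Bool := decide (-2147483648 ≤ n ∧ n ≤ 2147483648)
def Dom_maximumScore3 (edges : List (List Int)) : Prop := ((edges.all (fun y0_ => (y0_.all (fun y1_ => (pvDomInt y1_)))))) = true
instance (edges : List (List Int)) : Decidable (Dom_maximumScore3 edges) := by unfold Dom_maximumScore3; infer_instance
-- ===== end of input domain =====

-- B replaces A's memoized top-down recursive DFS with recursion-free bottom-up value
-- iteration (n+1 rounds rebuilding a flat dp table, one pass per node); equal return value.

-- ===== PORT A =====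
-- max(pair) on A's 2-element results
def pvMax2 (p : Int × Int) : Int := max p.1 p.2

-- tree = defaultdict(lambda: defaultdict(int)); for i,(u,w) in enumerate(edges): if u != -1: tree[u][i] = w
def pvTreeA (edges : List (List Int)) : PySem.Dict Int (PySem.Dict Int Int) :=
  (PySem.List.enumerate edges 0).foldl (fun t p =>
      match p.2 with
      | [u, w] => if u ≠ -1 then t.insert u ((t.getD u PySem.Dict.empty).insert p.1 w) else t
      | _ => t) PySem.Dict.empty

-- dfs(u): fuel only guards totality (edges.length + 1 suffices on Pre_); same computation
def pvDfsA (tree : PySem.Dict Int (PySem.Dict Int Int)) : Nat → Int → Int × Int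
  | 0, _ => (0, 0)
  | fuel+1, u =>
    let nbs := tree.getD u PySem.Dict.empty
    if nbs.items.isEmpty then (0, 0)
    else
      let s2 := nbs.keys.foldl (fun s v => s + pvMax2 (pvDfsA tree fuel v)) 0
      let s1 := nbs.keys.foldl
        (fun s v => max s (s2 - pvMax2 (pvDfsA tree fuel v) + max (nbs.getD v 0) 0 + (pvDfsA tree fuel v).2)) 0
      (s1, s2)

def maximumScore3 (edges : List (List Int)) : Int :=
  pvMax2 (pvDfsA (pvTreeA edges) (edges.length + 1) 0)

-- ===== PORT B =====
-- children = defaultdict(list); for i,(u,w) in enumerate(edges): if u != -1: children[u].append((i,w))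
def pvChildrenB (edges : List (List Int)) : PySem.Dict Int (List (Int × Int)) :=
  (PySem.List.enumerate edges 0).foldl (fun d p =>
      match p.2 with
      | [u, w] => if u ≠ -1 then d.modify u [] (· ++ [(p.1, w)]) else d
      | _ => d) PySem.Dict.empty

-- relax(u, dp): one pass over children[u] carrying (s2, best)
def pvRelaxB (ch : PySem.Dict Int (List (Int × Int))) (dp : PySem.Dict Int (Int × Int)) (u : Int) :
    Int × Int :=
  let r := (ch.getD u []).foldl (fun (acc : Int × Option Int) (vw : Int × Int) =>
      let c := dp.getD vw.1 ((0 : Int), (0 : Int))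
      let m := if c.1 > c.2 then c.1 else c.2
      let d := (if vw.2 > 0 then vw.2 else 0) + c.2 - m
      (acc.1 + m,
       some (match acc.2 with
             | none => d
             | some b => if d > b then d else b))) ((0 : Int), (none : Option Int))
  match r.2 with
  | none => (0, 0)
  | some b => (if r.1 + b < 0 then 0 else r.1 + b, r.1)

-- dp = {}; for _ in range(n+1): dp = {u: relax(u, dp) for u in range(n)}
def pvRoundsB (ch : PySem.Dict Int (List (Int × Int))) (n : Int) :
    Nat → PySem.Dict Int (Int × Int)
  | 0 => PySem.Dict.empty
  | f+1 => (PySem.List.pyRange 0 n 1).foldl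
      (fun d u => d.insert u (pvRelaxB ch (pvRoundsB ch n f) u)) PySem.Dict.empty

def maximumScore3_alt (edges : List (List Int)) : Int :=
  let ch := pvChildrenB edges
  let dp := pvRoundsB ch (edges.length : Int) (edges.length + 1)
  let p := dp.getD 0 ((0 : Int), (0 : Int))
  if p.1 > p.2 then p.1 else p.2

-- ===== PRECONDITION & SPEC =====
-- one parent-pointer step from node i (sentinel -2 once outside the node range)
def pvParentStep (edges : List (List Int)) (i : Int) : Int :=
  if 0 ≤ i ∧ i < edges.length then
    match edges.getD i.toNat [] with
    | p :: _ => p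
    | [] => -2
  else -2

-- A returns normally exactly when every edge is a [parent, weight] pair and node 0 is not on a
-- parent-pointer cycle (otherwise list unpacking raises ValueError, resp. dfs recurses forever).
def Pre_maximumScore3 (edges : List (List Int)) : Prop :=
  (∀ e ∈ edges, e.length = 2) ∧
  ∀ k ∈ List.range edges.length, (pvParentStep edges)^[k+1] 0 ≠ 0
instance (edges : List (List Int)) : Decidable (Pre_maximumScore3 edges) := by
  unfold Pre_maximumScore3; infer_instance

def pvWitness_maximumScore3 : List (List Int) := [[-1, 5], [0, 3], [0, -2], [2, 4]]

def Spec_maximumScore3 (edges : List (List Int)) (out : Int) : Prop := out = maximumScore3_alt edges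
instance (edges : List (List Int)) (out : Int) : Decidable (Spec_maximumScore3 edges out) := by unfold Spec_maximumScore3; infer_instance

-- ===== CLAIM (what is proved, stated in full; the proofs are below) =====
def Claim_equal_maximumScore3 : Prop := ∀ (edges : List (List Int)), Dom_maximumScore3 edges → Pre_maximumScore3 edges → Spec_maximumScore3 edges (maximumScore3 edges)

-- ===== LEMMAS AND PROOFS =====

-- the effective [parent, weight] edges, as (parent, (index, weight))
def pvSel (p : Int × List Int) : Option (Int × (Int × Int)) :=
  match p.2 with
  | [u, w] => if u ≠ -1 then some (u, (p.1, w)) else none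
  | _ => none

def pvKids (edges : List (List Int)) : List (Int × (Int × Int)) :=
  (PySem.List.enumerate edges 0).filterMap pvSel

lemma pvFoldl_sel {β : Type} (f : β → Int × (Int × Int) → β) :
    ∀ (l : List (Int × List Int)) (b : β),
      l.foldl (fun t p =>
        match p.2 with
        | [u, w] => if u ≠ -1 then f t (u, (p.1, w)) else t
        | _ => t) b
      = (l.filterMap pvSel).foldl f b := by
  intro l
  induction l with
  | nil => intro b; rfl
  | cons p l ih =>
    intro b
    rcases p with ⟨i, e⟩
    rcases e with _ | ⟨u, _ | ⟨w, _ | ⟨x, rest⟩⟩⟩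
    · simpa [pvSel] using ih _
    · simpa [pvSel] using ih _
    · by_cases hu : u = -1
      · simpa [pvSel, hu] using ih _
      · simpa [pvSel, hu] using ih _
    · simpa [pvSel] using ih _

lemma pvTreeA_eq (edges : List (List Int)) :
    pvTreeA edges = (pvKids edges).foldl
      (fun t q => t.insert q.1 ((t.getD q.1 PySem.Dict.empty).insert q.2.1 q.2.2))
      PySem.Dict.empty := by
  unfold pvTreeA pvKids
  exact pvFoldl_sel
    (fun (t : PySem.Dict Int (PySem.Dict Int Int)) q =>
      t.insert q.1 ((t.getD q.1 PySem.Dict.empty).insert q.2.1 q.2.2)) _ _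

lemma pvChildrenB_eq (edges : List (List Int)) :
    pvChildrenB edges = (pvKids edges).foldl
      (fun d q => d.modify q.1 [] (· ++ [q.2])) PySem.Dict.empty := by
  unfold pvChildrenB pvKids
  exact pvFoldl_sel (fun (d : PySem.Dict Int (List (Int × Int))) q => d.modify q.1 [] (· ++ [q.2])) _ _

lemma pvChildrenB_getD (edges : List (List Int)) (u : Int) :
    (pvChildrenB edges).getD u []
      = ((pvKids edges).filter (fun q => q.1 == u)).map (·.2) := by
  rw [pvChildrenB_eq]
  simpa using PySem.Dict.getD_foldl_modify_append (pvKids edges) PySem.Dict.empty u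

lemma pvTreeA_items_aux :
    ∀ (l : List (Int × (Int × Int))) (t : PySem.Dict Int (PySem.Dict Int Int)),
      (l.map (fun q => q.2.1)).Nodup →
      (∀ p i, i ∈ l.map (fun q => q.2.1) → (t.getD p PySem.Dict.empty).contains i = false) →
      ∀ u,
      ((l.foldl (fun t q => t.insert q.1 ((t.getD q.1 PySem.Dict.empty).insert q.2.1 q.2.2)) t).getD
          u PySem.Dict.empty).items
        = (t.getD u PySem.Dict.empty).items ++ (l.filter (fun q => q.1 == u)).map (·.2) := by
  intro l
  induction l with
  | nil => intro t _ _ u; simp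
  | cons q l ih =>
    intro t hnd hfresh u
    rw [List.map_cons, List.nodup_cons] at hnd
    have hq : (t.getD q.1 PySem.Dict.empty).contains q.2.1 = false :=
      hfresh q.1 q.2.1 (by simp)
    have hstep : ∀ p, ((t.insert q.1 ((t.getD q.1 PySem.Dict.empty).insert q.2.1 q.2.2)).getD p
        PySem.Dict.empty)
        = if p = q.1 then (t.getD q.1 PySem.Dict.empty).insert q.2.1 q.2.2
          else t.getD p PySem.Dict.empty := by
      intro p; rw [PySem.Dict.getD_insert]
    have hfresh' : ∀ p i, i ∈ l.map (fun q => q.2.1) →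
        (((t.insert q.1 ((t.getD q.1 PySem.Dict.empty).insert q.2.1 q.2.2)).getD p
          PySem.Dict.empty)).contains i = false := by
      intro p i hi
      rw [hstep p]
      split
      · rw [PySem.Dict.contains_insert]
        have hne : i ≠ q.2.1 := fun h => hnd.1 (h ▸ hi)
        simp [hne, hfresh q.1 i (by rw [List.map_cons]; exact List.mem_cons_of_mem _ hi)]
      · exact hfresh p i (by rw [List.map_cons]; exact List.mem_cons_of_mem _ hi)
    rw [List.foldl_cons, ih _ hnd.2 hfresh' u, hstep u]
    by_cases hu : u = q.1
    · subst hu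
      rw [if_pos rfl, PySem.Dict.items_insert_of_not_contains _ _ hq]
      simp [List.append_assoc]
    · rw [if_neg hu]
      have hqu : (q.1 == u) = false := by
        rw [beq_eq_false_iff_ne]
        exact fun h => hu h.symm
      simp [hqu]

lemma pvSel_fst {p : Int × List Int} {q : Int × (Int × Int)} (h : pvSel p = some q) :
    q.2.1 = p.1 := by
  rcases p with ⟨i, e⟩
  rcases e with _ | ⟨u, _ | ⟨w, _ | ⟨x, rest⟩⟩⟩ <;> simp [pvSel] at h
  rcases h with ⟨hu, hq⟩
  rw [← hq]

lemma pvKids_idx_pairwise (edges : List (List Int)) :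
    ((pvKids edges).map (fun q => q.2.1)).Pairwise (· < ·) := by
  unfold pvKids
  rw [List.pairwise_map, List.pairwise_filterMap]
  refine (PySem.List.pairwise_lt_enumerate edges 0).imp ?_
  intro a a' h b hb b' hb'
  rw [pvSel_fst hb, pvSel_fst hb']
  exact h

lemma pvKids_idx_nodup (edges : List (List Int)) :
    ((pvKids edges).map (fun q => q.2.1)).Nodup :=
  (pvKids_idx_pairwise edges).imp (fun h => ne_of_lt h)

lemma pvItems_eq (edges : List (List Int)) (u : Int) :
    ((pvTreeA edges).getD u PySem.Dict.empty).items = (pvChildrenB edges).getD u [] := by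
  rw [pvChildrenB_getD, pvTreeA_eq,
    pvTreeA_items_aux (pvKids edges) PySem.Dict.empty (pvKids_idx_nodup edges)
      (by intro p i _; simp) u]
  simp
  rfl

lemma pvCh_keys_nodup (edges : List (List Int)) (u : Int) :
    (((pvChildrenB edges).getD u []).map (·.1)).Nodup := by
  rw [pvChildrenB_getD, List.map_map]
  exact (pvKids_idx_nodup edges).sublist (List.Sublist.map _ List.filter_sublist)

-- every child index stored in children[u] is a position of edges
lemma pvKids_mem_bound (edges : List (List Int)) (u : Int) (vw : Int × Int)
    (h : vw ∈ (pvChildrenB edges).getD u []) : 0 ≤ vw.1 ∧ vw.1 < (edges.length : Int) := by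
  rw [pvChildrenB_getD] at h
  rcases List.mem_map.1 h with ⟨q, hq, hq2⟩
  have hq' : q ∈ pvKids edges := List.mem_of_mem_filter hq
  rcases List.mem_filterMap.1 hq' with ⟨p, hp, hsel⟩
  rcases (PySem.List.mem_enumerate_iff _ _ _).1 hp with ⟨k, hk, hpk⟩
  have : vw.1 = p.1 := by rw [← hq2, pvSel_fst hsel]
  rw [this, hpk]
  refine ⟨by simp, ?_⟩
  simp only [zero_add]
  omega

-- ----- node-body algebra: A's two passes = B's single delta pass -----

-- A's per-node computation with the child valuation abstracted
def pvNodeA (nbs : PySem.Dict Int Int) (c : Int → Int × Int) : Int × Int :=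
  if nbs.items.isEmpty then (0, 0)
  else
    let s2 := nbs.keys.foldl (fun s v => s + pvMax2 (c v)) 0
    let s1 := nbs.keys.foldl
      (fun s v => max s (s2 - pvMax2 (c v) + max (nbs.getD v 0) 0 + (c v).2)) 0
    (s1, s2)

lemma pvDfsA_succ (t : PySem.Dict Int (PySem.Dict Int Int)) (f : Nat) (u : Int) :
    pvDfsA t (f+1) u = pvNodeA (t.getD u PySem.Dict.empty) (pvDfsA t f) := rfl

-- B's loop body with the dp lookup abstracted
def pvStepB (c : Int → Int × Int) (acc : Int × Option Int) (vw : Int × Int) : Int × Option Int :=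
  let cc := c vw.1
  let m := if cc.1 > cc.2 then cc.1 else cc.2
  let d := (if vw.2 > 0 then vw.2 else 0) + cc.2 - m
  (acc.1 + m,
   some (match acc.2 with
         | none => d
         | some b => if d > b then d else b))

def pvNodeB (kids : List (Int × Int)) (c : Int → Int × Int) : Int × Int :=
  let r := kids.foldl (pvStepB c) ((0 : Int), (none : Option Int))
  match r.2 with
  | none => (0, 0)
  | some b => (if r.1 + b < 0 then 0 else r.1 + b, r.1)

lemma pvRelaxB_eq (ch : PySem.Dict Int (List (Int × Int))) (dp : PySem.Dict Int (Int × Int))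
    (u : Int) : pvRelaxB ch dp u = pvNodeB (ch.getD u []) (fun v => dp.getD v (0, 0)) := rfl

def pvDel (c : Int → Int × Int) (vw : Int × Int) : Int :=
  max vw.2 0 + (c vw.1).2 - pvMax2 (c vw.1)

lemma pvIfGt (a b : Int) : (if b < a then a else b) = max a b := by
  rw [max_def]; split_ifs <;> omega

lemma pvIfNeg (x : Int) : (if x < 0 then 0 else x) = max 0 x := by
  rw [max_def]; split_ifs <;> omega

lemma pvStepB_eq (c : Int → Int × Int) (acc : Int × Option Int) (vw : Int × Int) :
    pvStepB c acc vw = (acc.1 + pvMax2 (c vw.1),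
      some (match acc.2 with
            | none => pvDel c vw
            | some b => max b (pvDel c vw))) := by
  rcases acc with ⟨s, _ | b⟩ <;>
    simp [pvStepB, pvDel, pvMax2, pvIfGt, max_comm]

lemma pvFoldB_fst (c : Int → Int × Int) :
    ∀ (ks : List (Int × Int)) (s0 : Int) (b0 : Option Int),
      (ks.foldl (pvStepB c) (s0, b0)).1 = ks.foldl (fun s vw => s + pvMax2 (c vw.1)) s0 := by
  intro ks
  induction ks with
  | nil => intro s0 b0; rfl
  | cons hd tl ih =>
    intro s0 b0
    rw [List.foldl_cons, List.foldl_cons, pvStepB_eq]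
    exact ih _ _

lemma pvFoldB_snd (c : Int → Int × Int) :
    ∀ (ks : List (Int × Int)) (s0 b : Int),
      (ks.foldl (pvStepB c) (s0, some b)).2
        = some (ks.foldl (fun a vw => max a (pvDel c vw)) b) := by
  intro ks
  induction ks with
  | nil => intro s0 b; rfl
  | cons hd tl ih =>
    intro s0 b
    rw [List.foldl_cons, List.foldl_cons, pvStepB_eq]
    exact ih _ _

lemma pvMaxAlg (S b d : Int) : max 0 (S + max b d) = max (max 0 (S + b)) (S + d) := by
  rw [max_def, max_def, max_def, max_def]; split_ifs <;> omega

lemma pvMaxFold (c : Int → Int × Int) (S : Int) :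
    ∀ (tl : List (Int × Int)) (b : Int),
      max 0 (S + tl.foldl (fun a vw => max a (pvDel c vw)) b)
        = tl.foldl (fun a vw => max a (S + pvDel c vw)) (max 0 (S + b)) := by
  intro tl
  induction tl with
  | nil => intro b; rfl
  | cons hd tl ih =>
    intro b
    rw [List.foldl_cons, List.foldl_cons, ih, pvMaxAlg]

-- A's node body equals B's node body when items/keys line up and the valuations
-- agree on the children actually present
lemma pvNode_eq (nbs : PySem.Dict Int Int) (kids : List (Int × Int)) (c cB : Int → Int × Int)
    (hitems : nbs.items = kids) (hnd : (kids.map (·.1)).Nodup)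
    (hc : ∀ vw ∈ kids, cB vw.1 = c vw.1) :
    pvNodeA nbs c = pvNodeB kids cB := by
  have hkeys : nbs.keys = kids.map (·.1) := by
    simp only [PySem.Dict.keys]; rw [hitems]
  cases hks : kids with
  | nil =>
    have : nbs.items.isEmpty = true := by rw [hitems, hks]; rfl
    simp [pvNodeA, pvNodeB, this]
  | cons hd tl =>
    have hitemsu : nbs.items = hd :: tl := by rw [hitems, hks]
    have hne : nbs.items.isEmpty = false := by rw [hitemsu]; rfl
    unfold pvNodeA pvNodeB
    simp only [hne, Bool.false_eq_true, if_false]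
    have hkeysu : nbs.keys = (hd :: tl).map (·.1) := by rw [hkeys, hks]
    have hs2 : nbs.keys.foldl (fun s v => s + pvMax2 (c v)) 0
        = (hd :: tl).foldl (fun s vw => s + pvMax2 (cB vw.1)) 0 := by
      rw [hkeysu, List.foldl_map]
      refine PySem.List.foldl_congr_mem _ _ _ _ ?_
      intro acc vw hvw
      rw [hc vw (hks ▸ hvw)]
    set S := (hd :: tl).foldl (fun s vw => s + pvMax2 (cB vw.1)) 0 with hS
    have hnodup : nbs.keys.Nodup := by rw [hkeys]; exact hnd
    have hgetD : ∀ vw ∈ hd :: tl, nbs.getD vw.1 0 = vw.2 := by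
      intro vw hvw
      exact PySem.Dict.getD_of_mem_items _ (by rw [hitemsu]; simpa using hvw) hnodup 0
    have hs1 : nbs.keys.foldl
          (fun s v => max s (S - pvMax2 (c v) + max (nbs.getD v 0) 0 + (c v).2)) 0
        = (hd :: tl).foldl (fun a vw => max a (S + pvDel cB vw)) 0 := by
      rw [hkeysu, List.foldl_map]
      refine PySem.List.foldl_congr_mem _ _ _ _ ?_
      intro acc vw hvw
      rw [hgetD vw hvw, ← hc vw (hks ▸ hvw)]
      have : S - pvMax2 (cB vw.1) + max vw.2 0 + (cB vw.1).2 = S + pvDel cB vw := by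
        unfold pvDel; ring
      rw [this]
    rw [hs2, hs1]
    have hfold1 : ((hd :: tl).foldl (pvStepB cB) ((0 : Int), (none : Option Int)))
        = tl.foldl (pvStepB cB) (pvMax2 (cB hd.1), some (pvDel cB hd)) := by
      rw [List.foldl_cons, pvStepB_eq]
      norm_num
    have hfst : (tl.foldl (pvStepB cB) (pvMax2 (cB hd.1), some (pvDel cB hd))).1 = S := by
      rw [pvFoldB_fst, hS, List.foldl_cons]
      norm_num
    have hsnd : (tl.foldl (pvStepB cB) (pvMax2 (cB hd.1), some (pvDel cB hd))).2
        = some (tl.foldl (fun a vw => max a (pvDel cB vw)) (pvDel cB hd)) := pvFoldB_snd _ _ _ _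
    rw [hfold1]
    rcases hr : tl.foldl (pvStepB cB) (pvMax2 (cB hd.1), some (pvDel cB hd)) with ⟨r1, r2⟩
    rw [hr] at hfst hsnd
    simp only at hfst hsnd
    rw [hfst, hsnd]
    simp only [List.foldl_cons]
    rw [pvIfNeg, pvMaxFold]

-- ----- the comprehension dict: getD is the generating function -----

lemma pvGetD_foldl_insert_fn_not_mem {ν : Type} (g : Int → ν) (dflt : ν) :
    ∀ (ks : List Int) (d : PySem.Dict Int ν) (v : Int), v ∉ ks →
      (ks.foldl (fun d u => d.insert u (g u)) d).getD v dflt = d.getD v dflt := by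
  intro ks
  induction ks with
  | nil => intro d v _; rfl
  | cons k ks ih =>
    intro d v hv
    rw [List.foldl_cons, ih _ _ (fun h => hv (List.mem_cons_of_mem _ h)),
      PySem.Dict.getD_insert, if_neg (fun h => hv (by rw [h]; simp))]

lemma pvGetD_foldl_insert_fn {ν : Type} (g : Int → ν) (dflt : ν) :
    ∀ (ks : List Int) (d : PySem.Dict Int ν) (v : Int), v ∈ ks →
      (ks.foldl (fun d u => d.insert u (g u)) d).getD v dflt = g v := by
  intro ks
  induction ks with
  | nil => intro d v hv; cases hv
  | cons k ks ih =>
    intro d v hv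
    rw [List.foldl_cons]
    by_cases h : v ∈ ks
    · exact ih _ _ h
    · have hvk : v = k := by rcases List.mem_cons.1 hv with h' | h' <;> [exact h'; exact absurd h' h]
      rw [pvGetD_foldl_insert_fn_not_mem g dflt ks _ v h, PySem.Dict.getD_insert, if_pos hvk, hvk]

-- ----- the round invariant: f rounds of value iteration = A's dfs with fuel f -----

lemma pvRounds_eq (edges : List (List Int)) :
    ∀ (f : Nat) (v : Int), 0 ≤ v → v < (edges.length : Int) →
      (pvRoundsB (pvChildrenB edges) (edges.length : Int) f).getD v (0, 0)
        = pvDfsA (pvTreeA edges) f v := by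
  intro f
  induction f with
  | zero => intro v _ _; simp [pvRoundsB, pvDfsA, PySem.Dict.getD_empty]
  | succ f ih =>
    intro v hv0 hvn
    rw [pvRoundsB, pvGetD_foldl_insert_fn _ _ _ _ v
      (PySem.List.mem_pyRange_one.2 ⟨hv0, hvn⟩)]
    rw [pvRelaxB_eq, pvDfsA_succ]
    exact (pvNode_eq _ _ (pvDfsA (pvTreeA edges) f)
      (fun x => (pvRoundsB (pvChildrenB edges) (edges.length : Int) f).getD x (0, 0))
      (pvItems_eq edges v) (pvCh_keys_nodup edges v)
      (fun vw hvw => ih vw.1 (pvKids_mem_bound edges v vw hvw).1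
        (pvKids_mem_bound edges v vw hvw).2)).symm

-- ===== VERDICT (by name: the statement is the Claim_ definition above) =====
theorem maximumScore3_spec : Claim_equal_maximumScore3 := by
  intro edges _ _
  unfold Spec_maximumScore3 maximumScore3 maximumScore3_alt
  cases edges with
  | nil => decide
  | cons e es =>
    show pvMax2 (pvDfsA (pvTreeA (e :: es)) ((e :: es).length + 1) 0)
        = (if ((pvRoundsB (pvChildrenB (e :: es)) (((e :: es).length : Int)) ((e :: es).length + 1)).getD 0 ((0 : Int), (0 : Int))).1
              > ((pvRoundsB (pvChildrenB (e :: es)) (((e :: es).length : Int)) ((e :: es).length + 1)).getD 0 ((0 : Int), (0 : Int))).2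
           then ((pvRoundsB (pvChildrenB (e :: es)) (((e :: es).length : Int)) ((e :: es).length + 1)).getD 0 ((0 : Int), (0 : Int))).1
           else ((pvRoundsB (pvChildrenB (e :: es)) (((e :: es).length : Int)) ((e :: es).length + 1)).getD 0 ((0 : Int), (0 : Int))).2)
    rw [pvRounds_eq (e :: es) ((e :: es).length + 1) 0 le_rfl (by simp), pvIfGt]
    rfl
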